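-- pv_equiv track=rewrite | github.com/HavosAi/HavosAi | src/text_processing/affiliations_extractor.py | generate_subexpressions
-- ===== SOURCE A (Python) =====
-- def generate_subexpressions(expression):
--     words = expression.split()
--     generated_words = set()
--     for i in range(len(words)):
--         word = words[i]
--         generated_words.add(word)
--         for j in range(i+1, len(words)):
--             word = word + " " + words[j]
--             generated_words.add(word)
--     return generated_words
-- ===== SOURCE B (Python) =====
-- def generate_subexpressions(expression):
--     words = expression.split()
--     return {" ".join(words[i:j])
--             for i in range(len(words))
--             for j in range(i + 1, len(words) + 1)}
-- ===== Notes on version B (the rewrite author's own statement) =====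
-- stated objective: simpler
-- what changed: Replaces A's nested loops that thread a growing accumulator string and mutate a set with a single set comprehension that recomputes each contiguous phrase directly as " ".join(words[i:j]).
import Mathlib
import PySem

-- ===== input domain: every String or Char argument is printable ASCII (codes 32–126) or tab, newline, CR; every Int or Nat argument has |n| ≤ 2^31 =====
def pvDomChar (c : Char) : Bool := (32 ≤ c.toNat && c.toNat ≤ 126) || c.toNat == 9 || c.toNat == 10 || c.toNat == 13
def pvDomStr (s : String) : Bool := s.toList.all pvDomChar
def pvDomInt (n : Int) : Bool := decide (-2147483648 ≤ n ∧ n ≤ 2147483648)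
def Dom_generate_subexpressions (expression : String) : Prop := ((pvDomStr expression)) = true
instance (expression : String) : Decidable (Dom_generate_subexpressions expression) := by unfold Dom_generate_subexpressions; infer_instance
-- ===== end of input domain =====

-- B replaces A's accumulator-threading nested loops with a direct set comprehension
-- computing " ".join(words[i:j]) for every index pair (objective: simpler; same cost).

-- ===== PORT A =====
def generate_subexpressions (expression : String) : List String :=
  let words := PySem.Str.split₀ expression
  (PySem.List.pyRange 0 (words.length : Int) 1).foldl
    (fun generated_words i =>
      let word := PySem.List.pyGetD words i ""
      let generated_words := PySem.Set.add generated_words word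
      ((PySem.List.pyRange (i + 1) (words.length : Int) 1).foldl
        (fun (st : PySem.Set String × String) j =>
          let word := st.2 ++ " " ++ PySem.List.pyGetD words j ""
          (PySem.Set.add st.1 word, word))
        (generated_words, word)).1)
    PySem.Set.empty

-- ===== PORT B =====
def generate_subexpressions_alt (expression : String) : List String :=
  let words := PySem.Str.split₀ expression
  PySem.Set.ofList
    ((PySem.List.pyRange 0 (words.length : Int) 1).flatMap (fun i =>
      (PySem.List.pyRange (i + 1) ((words.length : Int) + 1) 1).map (fun j =>
        PySem.Str.join " " (PySem.List.slice words (some i) (some j)))))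

-- ===== PRECONDITION & SPEC =====
def Spec_generate_subexpressions (expression : String) (out : List String) : Prop := out = generate_subexpressions_alt expression
instance (expression : String) (out : List String) : Decidable (Spec_generate_subexpressions expression out) := by unfold Spec_generate_subexpressions; infer_instance

-- ===== CLAIM (what is proved, stated in full; the proofs are below) =====
def Claim_equal_generate_subexpressions : Prop := ∀ (expression : String), Dom_generate_subexpressions expression → Spec_generate_subexpressions expression (generate_subexpressions expression)

-- ===== LEMMAS AND PROOFS =====

/-- The strings A's inner loop adds, starting from accumulator `w`, over remaining words. -/
def pvPrefixes (w : String) : List String → List String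
  | [] => []
  | x :: t => (w ++ " " ++ x) :: pvPrefixes (w ++ " " ++ x) t

/-- All strings added, in order, over a suffix of the word list. -/
def pvAll : List String → List String
  | [] => []
  | x :: t => (x :: pvPrefixes x t) ++ pvAll t

lemma pv_chars_join_snoc (sep p : List Char) :
    ∀ (ps : List (List Char)), ps ≠ [] →
    PySem.Chars.join sep (ps ++ [p]) = PySem.Chars.join sep ps ++ sep ++ p := by
  intro ps
  induction ps with
  | nil => intro h; cases h rfl
  | cons q t ih =>
    intro _
    cases t with
    | nil =>
      simp [PySem.Chars.join_cons_cons, PySem.Chars.join_singleton]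
    | cons r u =>
      simp only [List.cons_append] at ih ⊢
      rw [PySem.Chars.join_cons_cons, ih (by simp), PySem.Chars.join_cons_cons]
      simp

lemma pv_join_snoc (l : List String) (x : String) (h : l ≠ []) :
    PySem.Str.join " " (l ++ [x]) = PySem.Str.join " " l ++ " " ++ x := by
  apply String.ext
  have hmap : List.map String.toList (l ++ [x]) = List.map String.toList l ++ [x.toList] := by
    simp
  rw [PySem.Str.toList_join, hmap,
    pv_chars_join_snoc " ".toList x.toList (List.map String.toList l) (by simpa using h)]
  simp [PySem.Str.toList_join]

lemma pv_join_singleton (x : String) : PySem.Str.join " " [x] = x := by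
  apply String.ext
  simp [PySem.Str.toList_join, PySem.Chars.join_singleton]

lemma pv_slice_succ (words : List String) (i j : Nat) (hij : i ≤ j) (hj : j < words.length) :
    PySem.List.slice words (some (i : Int)) (some ((j : Int) + 1)) =
      PySem.List.slice words (some (i : Int)) (some (j : Int)) ++ [words[j]] := by
  have : ((j : Int) + 1) = ((j + 1 : Nat) : Int) := by push_cast; ring
  rw [this, PySem.List.slice_natCast, PySem.List.slice_natCast]
  have h1 : j + 1 - i = (j - i) + 1 := by omega
  rw [h1, List.take_add_one]
  have h2 : (List.drop i words)[j - i]? = some words[j] := by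
    rw [List.getElem?_drop]
    have : i + (j - i) = j := by omega
    rw [this, List.getElem?_eq_getElem hj]
  rw [h2]
  rfl

lemma pv_join_slice_succ (words : List String) (i j : Nat) (hij : i < j) (hj : j < words.length) :
    PySem.Str.join " " (PySem.List.slice words (some (i : Int)) (some ((j : Int) + 1))) =
      PySem.Str.join " " (PySem.List.slice words (some (i : Int)) (some (j : Int))) ++ " " ++ words[j] := by
  rw [pv_slice_succ words i j (by omega) hj]
  apply pv_join_snoc
  rw [PySem.List.slice_natCast]
  have : (List.take (j - i) (List.drop i words)).length = j - i := by
    rw [List.length_take, List.length_drop]; omega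
  intro hnil
  rw [hnil] at this
  simp at this
  omega

lemma pv_slice_one (words : List String) (i : Nat) (hi : i < words.length) :
    PySem.List.slice words (some (i : Int)) (some ((i : Int) + 1)) = [words[i]] := by
  rw [pv_slice_succ words i i (by omega) hi, PySem.List.slice_natCast]
  simp

-- B's inner comprehension, from start index j on, lists the joined slices = pvPrefixes chain.
lemma pv_B_inner (words : List String) (i : Nat) :
    ∀ (m j : Nat), i < j → j ≤ words.length → words.length - j = m →
    ((PySem.List.pyRange (j : Int) ((words.length : Int) + 1) 1).map (fun jj =>
        PySem.Str.join " " (PySem.List.slice words (some (i : Int)) (some jj))))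
      = PySem.Str.join " " (PySem.List.slice words (some (i : Int)) (some (j : Int))) ::
          pvPrefixes (PySem.Str.join " " (PySem.List.slice words (some (i : Int)) (some (j : Int))))
            (words.drop j) := by
  intro m
  induction m with
  | zero =>
    intro j hij hj hm
    have hje : j = words.length := by omega
    subst hje
    rw [PySem.List.pyRange_one_singleton]
    simp [pvPrefixes]
  | succ n ih =>
    intro j hij hj hm
    have hlt : j < words.length := by omega
    rw [PySem.List.pyRange_one_cons (by exact_mod_cast by omega : (j : Int) < (words.length : Int) + 1)]
    rw [List.map_cons]
    have hcast : ((j : Int) + 1) = ((j + 1 : Nat) : Int) := by push_cast; ring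
    rw [hcast, ih (j + 1) (by omega) (by omega) (by omega)]
    rw [List.drop_eq_getElem_cons hlt]
    rw [pvPrefixes]
    rw [← hcast, pv_join_slice_succ words i j hij hlt]

-- B's flatMap over start indices from k equals pvAll of the word-list suffix.
lemma pv_B_outer (words : List String) :
    ∀ (m k : Nat), k ≤ words.length → words.length - k = m →
    ((PySem.List.pyRange (k : Int) (words.length : Int) 1).flatMap (fun i =>
        (PySem.List.pyRange (i + 1) ((words.length : Int) + 1) 1).map (fun j =>
          PySem.Str.join " " (PySem.List.slice words (some i) (some j)))))
      = pvAll (words.drop k) := by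
  intro m
  induction m with
  | zero =>
    intro k hk hm
    have hke : k = words.length := by omega
    subst hke
    rw [PySem.List.pyRange_one_eq_nil (le_refl _)]
    simp [pvAll]
  | succ n ih =>
    intro k hk hm
    have hlt : k < words.length := by
      omega
    rw [PySem.List.pyRange_one_cons (by exact_mod_cast hlt)]
    rw [List.flatMap_cons]
    have hcast : ((k : Int) + 1) = ((k + 1 : Nat) : Int) := by push_cast; ring
    rw [hcast]
    rw [pv_B_inner words k n (k + 1) (by omega) (by omega) (by omega)]
    rw [ih (k + 1) (by omega) (by omega)]
    rw [List.drop_eq_getElem_cons hlt]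
    rw [pvAll]
    rw [← hcast, pv_slice_one words k hlt, pv_join_singleton]

-- A's inner loop, starting at accumulator (s, w) with index j, adds exactly pvPrefixes w (drop j).
lemma pv_A_inner (words : List String) :
    ∀ (m j : Nat) (s : PySem.Set String) (w : String), j ≤ words.length → words.length - j = m →
    ((PySem.List.pyRange (j : Int) (words.length : Int) 1).foldl
        (fun (st : PySem.Set String × String) jj =>
          let word := st.2 ++ " " ++ PySem.List.pyGetD words jj ""
          (PySem.Set.add st.1 word, word))
        (s, w)).1
      = PySem.Set.update s (pvPrefixes w (words.drop j)) := by
  intro m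
  induction m with
  | zero =>
    intro j s w hj hm
    have hje : j = words.length := by omega
    subst hje
    rw [PySem.List.pyRange_one_eq_nil (le_refl _)]
    simp [pvPrefixes, PySem.Set.update_nil]
  | succ n ih =>
    intro j s w hj hm
    have hlt : j < words.length := by omega
    rw [PySem.List.pyRange_one_cons (by exact_mod_cast hlt)]
    rw [List.foldl_cons]
    simp only [PySem.List.pyGetD_ofNat words j "" hlt]
    have hcast : ((j : Int) + 1) = ((j + 1 : Nat) : Int) := by push_cast; ring
    rw [hcast, ih (j + 1) _ _ (by omega) (by omega)]
    rw [List.drop_eq_getElem_cons hlt, pvPrefixes, PySem.Set.update_cons]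

-- A's outer loop from index k maps accumulator s to update s (pvAll (drop k)).
lemma pv_A_outer (words : List String) :
    ∀ (m k : Nat) (s : PySem.Set String), k ≤ words.length → words.length - k = m →
    ((PySem.List.pyRange (k : Int) (words.length : Int) 1).foldl
        (fun generated_words i =>
          let word := PySem.List.pyGetD words i ""
          let generated_words := PySem.Set.add generated_words word
          ((PySem.List.pyRange (i + 1) (words.length : Int) 1).foldl
            (fun (st : PySem.Set String × String) j =>
              let word := st.2 ++ " " ++ PySem.List.pyGetD words j ""
              (PySem.Set.add st.1 word, word))
            (generated_words, word)).1)
        s)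
      = PySem.Set.update s (pvAll (words.drop k)) := by
  intro m
  induction m with
  | zero =>
    intro k s hk hm
    have hke : k = words.length := by omega
    subst hke
    rw [PySem.List.pyRange_one_eq_nil (le_refl _)]
    simp [pvAll, PySem.Set.update_nil]
  | succ n ih =>
    intro k s hk hm
    have hlt : k < words.length := by omega
    rw [PySem.List.pyRange_one_cons (by exact_mod_cast hlt)]
    rw [List.foldl_cons]
    simp only [PySem.List.pyGetD_ofNat words k "" hlt]
    have hcast : ((k : Int) + 1) = ((k + 1 : Nat) : Int) := by push_cast; ring
    rw [hcast]
    rw [pv_A_inner words (n + 1 - 1) (k + 1) _ _ (by omega) (by omega)]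
    rw [ih (k + 1) _ (by omega) (by omega)]
    rw [List.drop_eq_getElem_cons hlt, pvAll, List.cons_append,
      PySem.Set.update_cons, PySem.Set.update_append]

-- ===== VERDICT (by name: the statement is the Claim_ definition above) =====
theorem generate_subexpressions_spec : Claim_equal_generate_subexpressions := by
  intro expression _
  unfold Spec_generate_subexpressions
  have hA := pv_A_outer (PySem.Str.split₀ expression) (PySem.Str.split₀ expression).length 0
    PySem.Set.empty (by omega) rfl
  have hB := pv_B_outer (PySem.Str.split₀ expression) (PySem.Str.split₀ expression).length 0
    (by omega) rfl
  rw [Nat.cast_zero, List.drop_zero] at hA hB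
  calc generate_subexpressions expression
      = PySem.Set.update PySem.Set.empty (pvAll (PySem.Str.split₀ expression)) := hA
    _ = PySem.Set.ofList (pvAll (PySem.Str.split₀ expression)) := PySem.Set.update_empty _
    _ = generate_subexpressions_alt expression := (congrArg PySem.Set.ofList hB).symm
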